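-- pv_equiv track=rewrite | github.com/WRXinYue/STS2-DevMode | scripts/shake_icons.py | pascal_to_kebab
-- ===== SOURCE A (Python) =====
-- def pascal_to_kebab(pascal: str) -> str:
--     parts: list[str] = []
--     for i, c in enumerate(pascal):
--         if c.isupper():
--             if i > 0:
--                 parts.append("-")
--             parts.append(c.lower())
--         else:
--             parts.append(c)
--     return "".join(parts)
-- ===== SOURCE B (Python) =====
-- def pascal_to_kebab(pascal: str) -> str:
--     words: list[str] = []
--     for c in pascal:
--         if c.isupper() or not words:
--             words.append(c.lower())
--         else:
--             words[-1] += c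
--     return "-".join(words)
-- ===== Notes on version B (the rewrite author's own statement) =====
-- stated objective: simpler
-- what changed: A emits output char by char, inserting a '-' before each uppercase char past position 0; B groups the string into words (an uppercase char, or the very first char, starts a new lowered word) and returns '-'.join(words).
import Mathlib
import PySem

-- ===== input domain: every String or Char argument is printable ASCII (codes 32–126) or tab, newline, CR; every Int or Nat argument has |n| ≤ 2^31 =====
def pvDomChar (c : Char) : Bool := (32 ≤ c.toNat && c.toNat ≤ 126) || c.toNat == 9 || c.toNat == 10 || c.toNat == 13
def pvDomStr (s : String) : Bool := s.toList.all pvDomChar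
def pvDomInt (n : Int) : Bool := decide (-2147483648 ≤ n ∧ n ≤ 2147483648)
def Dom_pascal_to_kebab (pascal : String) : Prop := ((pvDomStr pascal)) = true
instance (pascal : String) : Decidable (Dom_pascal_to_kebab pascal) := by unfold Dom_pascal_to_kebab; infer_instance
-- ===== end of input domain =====

-- B replaces A's char-by-char emit (dash inserted before each inner uppercase) by grouping the
-- string into words and joining them with '-': same result, a different decomposition (objective: simpler).

-- ===== PORT A =====
-- A: enumerate the chars; an uppercase char (at i>0 preceded by "-") is emitted lowered, others as-is; "".join.
def pvStepA (parts : List (List Char)) (ic : Int × Char) : List (List Char) :=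
  if PySem.Chars.isupper ic.2 then
    (if ic.1 > 0 then parts ++ [['-']] else parts) ++ [[PySem.Chars.lowerChar ic.2]]
  else parts ++ [[ic.2]]

def pascal_to_kebab (pascal : String) : String :=
  String.ofList (PySem.Chars.join [] ((PySem.List.enumerate pascal.toList).foldl pvStepA []))

-- ===== PORT B =====
-- B: group into words (uppercase, or the very first char, starts a new word, lowered; others extend
-- the last word), then "-".join(words).
def pvStepB (ws : List (List Char)) (c : Char) : List (List Char) :=
  if PySem.Chars.isupper c || ws.isEmpty then ws ++ [[PySem.Chars.lowerChar c]]
  else ws.dropLast ++ [ws.getLastD [] ++ [c]]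

def pascal_to_kebab_alt (pascal : String) : String :=
  String.ofList (PySem.Chars.join ['-'] (pascal.toList.foldl pvStepB []))

-- ===== PRECONDITION & SPEC =====
def Spec_pascal_to_kebab (pascal : String) (out : String) : Prop := out = pascal_to_kebab_alt pascal
instance (pascal : String) (out : String) : Decidable (Spec_pascal_to_kebab pascal out) := by unfold Spec_pascal_to_kebab; infer_instance

-- ===== CLAIM (what is proved, stated in full; the proofs are below) =====
def Claim_equal_pascal_to_kebab : Prop := ∀ (pascal : String), Dom_pascal_to_kebab pascal → Spec_pascal_to_kebab pascal (pascal_to_kebab pascal)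

-- ===== LEMMAS AND PROOFS =====

-- what one char contributes to the output, past the first position
def pvEmit (c : Char) : List Char :=
  if PySem.Chars.isupper c then ['-', PySem.Chars.lowerChar c] else [c]

-- the parts A appends for one char at a positive index
def pvPartsOf (c : Char) : List (List Char) :=
  if PySem.Chars.isupper c then [['-'], [PySem.Chars.lowerChar c]] else [[c]]

theorem pv_join_nil_eq_flatten (ws : List (List Char)) :
    PySem.Chars.join [] ws = ws.flatten := by
  induction ws with
  | nil => simp [PySem.Chars.join_nil]
  | cons a t ih =>
    cases t with
    | nil => simp [PySem.Chars.join_singleton]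
    | cons b t' => rw [PySem.Chars.join_cons_cons, ih]; simp

theorem pv_join_append_singleton (sep : List Char) (ws : List (List Char)) (w : List Char)
    (h : ws ≠ []) :
    PySem.Chars.join sep (ws ++ [w]) = PySem.Chars.join sep ws ++ sep ++ w := by
  induction ws with
  | nil => exact absurd rfl h
  | cons a t ih =>
    cases t with
    | nil => simp [PySem.Chars.join_singleton, PySem.Chars.join_cons_cons]
    | cons b t' =>
      rw [List.cons_append, PySem.Chars.join_cons_cons]
      rw [List.cons_append] at ih ⊢
      rw [PySem.Chars.join_cons_cons, ih (by simp)]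
      simp

theorem pv_join_update_last (sep : List Char) (ws : List (List Char)) (c : Char)
    (h : ws ≠ []) :
    PySem.Chars.join sep (ws.dropLast ++ [ws.getLastD [] ++ [c]]) =
      PySem.Chars.join sep ws ++ [c] := by
  rcases ws.eq_nil_or_concat with rfl | ⟨p, w, rfl⟩
  · exact absurd rfl h
  · rw [List.concat_eq_append] at *
    rw [List.dropLast_concat, List.getLastD_concat]
    cases hp : p with
    | nil => simp [PySem.Chars.join_singleton]
    | cons a t =>
      rw [← hp, pv_join_append_singleton sep p _ (by simp [hp]),
          pv_join_append_singleton sep p _ (by simp [hp])]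
      simp

theorem pv_foldA_tail (rest : List Char) (s : Int) (parts : List (List Char)) (hs : 1 ≤ s) :
    (PySem.List.enumerate rest s).foldl pvStepA parts = parts ++ rest.flatMap pvPartsOf := by
  induction rest generalizing s parts with
  | nil => simp [PySem.List.enumerate_nil]
  | cons c r ih =>
    rw [PySem.List.enumerate_cons, List.foldl_cons]
    rw [ih (s + 1) _ (by omega)]
    have hstep : pvStepA parts (s, c) = parts ++ pvPartsOf c := by
      unfold pvStepA pvPartsOf
      by_cases h : PySem.Chars.isupper c
      · simp [h, show s > 0 by omega]
      · simp [h]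
    rw [hstep, List.flatMap_cons]
    simp

theorem pv_foldB_tail (rest : List Char) (ws : List (List Char)) (h : ws ≠ []) :
    PySem.Chars.join ['-'] (rest.foldl pvStepB ws) =
      PySem.Chars.join ['-'] ws ++ rest.flatMap pvEmit := by
  induction rest generalizing ws with
  | nil => simp
  | cons c r ih =>
    rw [List.foldl_cons]
    by_cases hu : PySem.Chars.isupper c
    · have hstep : pvStepB ws c = ws ++ [[PySem.Chars.lowerChar c]] := by
        unfold pvStepB; simp [hu]
      rw [hstep, ih _ (by simp), pv_join_append_singleton _ _ _ h]
      simp [pvEmit, hu, List.flatMap_cons]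
    · have hstep : pvStepB ws c = ws.dropLast ++ [ws.getLastD [] ++ [c]] := by
        unfold pvStepB; simp [hu, h]
      rw [hstep, ih _ (by simp), pv_join_update_last _ _ _ h]
      simp [pvEmit, hu, List.flatMap_cons]

theorem pv_flatten_partsOf (rest : List Char) :
    (rest.flatMap pvPartsOf).flatten = rest.flatMap pvEmit := by
  induction rest with
  | nil => simp
  | cons c r ih =>
    rw [List.flatMap_cons, List.flatMap_cons, List.flatten_append, ih]
    by_cases h : PySem.Chars.isupper c
    · have h1 : pvPartsOf c = [['-'], [PySem.Chars.lowerChar c]] := by simp [pvPartsOf, h]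
      have h2 : pvEmit c = ['-', PySem.Chars.lowerChar c] := by simp [pvEmit, h]
      rw [h1, h2]; simp
    · have h1 : pvPartsOf c = [[c]] := by simp [pvPartsOf, h]
      have h2 : pvEmit c = [c] := by simp [pvEmit, h]
      rw [h1, h2]; simp

theorem pv_lower_of_not_upper (c : Char) (h : ¬ PySem.Chars.isupper c = true) :
    PySem.Chars.lowerChar c = c := by
  simp [PySem.Chars.lowerChar, h]

-- ===== VERDICT (by name: the statement is the Claim_ definition above) =====
theorem pascal_to_kebab_spec : Claim_equal_pascal_to_kebab := by
  intro pascal _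
  unfold Spec_pascal_to_kebab pascal_to_kebab pascal_to_kebab_alt
  cases hs : pascal.toList with
  | nil => simp [PySem.List.enumerate_nil, PySem.Chars.join_nil]
  | cons c rest =>
    rw [PySem.List.enumerate_cons, List.foldl_cons, List.foldl_cons]
    have hA : pvStepA [] (0, c) = [[PySem.Chars.lowerChar c]] := by
      unfold pvStepA
      by_cases h : PySem.Chars.isupper c
      · simp [h]
      · simp [h, pv_lower_of_not_upper c h]
    have hB : pvStepB [] c = [[PySem.Chars.lowerChar c]] := by
      unfold pvStepB; simp
    rw [hA, hB, show (0 : Int) + 1 = 1 from rfl]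
    rw [pv_foldA_tail rest 1 _ (by omega)]
    rw [pv_foldB_tail rest _ (by simp)]
    rw [PySem.Chars.join_singleton, pv_join_nil_eq_flatten]
    rw [List.cons_append, List.nil_append, List.flatten_cons, pv_flatten_partsOf]
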